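-- pv_equiv track=rewrite | github.com/nexi-lab/nexus | scripts/gen_metadata.py | _enum_common_prefix
-- ===== SOURCE A (Python) =====
-- def _enum_common_prefix(values: list[tuple[str, int]]) -> str:
--     """Find common prefix of enum value names ending with '_'.
--
--     Example: [("DT_REG", 0), ("DT_DIR", 1)] -> "DT_"
--     """
--     if not values:
--         return ""
--     names = [v[0] for v in values]
--     prefix = names[0]
--     for name in names[1:]:
--         while not name.startswith(prefix):
--             prefix = prefix[:-1]
--     # Trim to last '_' boundary
--     idx = prefix.rfind("_")
--     return prefix[: idx + 1] if idx >= 0 else ""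
-- ===== SOURCE B (Python) =====
-- def _enum_common_prefix(values: list[tuple[str, int]]) -> str:
--     """Find common prefix of enum value names ending with '_'.
--
--     Column-wise: walk character positions via zip(*names), stopping at the
--     first column whose characters disagree.
--     """
--     if not values:
--         return ""
--     names = [v[0] for v in values]
--     chars = []
--     for col in zip(*names):
--         if any(ch != col[0] for ch in col):
--             break
--         chars.append(col[0])
--     prefix = "".join(chars)
--     idx = prefix.rfind("_")
--     return prefix[: idx + 1] if idx >= 0 else ""
-- ===== Notes on version B (the rewrite author's own statement) =====
-- stated objective: alternative
-- what changed: B builds the common prefix column-wise by scanning character positions of zip(*names) and stopping at the first disagreeing column, instead of A's row-wise shrinking of a candidate prefix with repeated startswith tests.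
import Mathlib
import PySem

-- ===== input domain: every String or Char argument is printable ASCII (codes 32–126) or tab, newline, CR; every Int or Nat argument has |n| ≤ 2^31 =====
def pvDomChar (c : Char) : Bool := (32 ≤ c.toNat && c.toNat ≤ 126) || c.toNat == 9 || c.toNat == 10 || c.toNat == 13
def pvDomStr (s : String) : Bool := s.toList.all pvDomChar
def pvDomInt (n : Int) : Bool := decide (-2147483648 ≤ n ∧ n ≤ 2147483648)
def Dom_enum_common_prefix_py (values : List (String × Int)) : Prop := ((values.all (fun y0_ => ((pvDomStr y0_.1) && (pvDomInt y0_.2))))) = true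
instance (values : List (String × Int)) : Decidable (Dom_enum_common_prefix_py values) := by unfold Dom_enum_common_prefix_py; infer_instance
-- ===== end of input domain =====

-- B computes the common prefix column-wise over zip(*names) instead of shrinking a row-wise
-- candidate with startswith (objective: alternative decomposition; same trailing '_'-trim).

-- ===== PORT A =====
-- prefix[:-1] is List.dropLast (needed by the termination argument of the while loop)
theorem pvSliceNegOne (p : List Char) : PySem.List.slice p none (some (-1)) = p.dropLast := by
  cases p with
  | nil => rfl
  | cons a q =>
    simp [PySem.List.slice, PySem.List.clampIdx, List.dropLast_eq_take]
    split <;> omega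

theorem pvNotStartswith_ne_nil (n p : List Char) (h : ¬ PySem.Chars.startswith n p = true) :
    p ≠ [] := by
  intro hp; subst hp
  exact h ((PySem.Chars.startswith_iff n []).mpr List.nil_prefix)

-- while not name.startswith(prefix): prefix = prefix[:-1]
def pyWhileDrop (name : List Char) (p : List Char) : List Char :=
  if PySem.Chars.startswith name p then p
  else pyWhileDrop name (PySem.List.slice p none (some (-1)))
termination_by p.length
decreasing_by
  rename_i h
  rw [pvSliceNegOne]
  have := pvNotStartswith_ne_nil name p h
  cases p with
  | nil => exact absurd rfl this
  | cons a q => simp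

def enum_common_prefix_py (values : List (String × Int)) : String :=
  match values with
  | [] => ""                                     -- if not values: return ""
  | _ :: _ =>
    let names := values.map (fun v => v.1.toList)  -- names = [v[0] for v in values]
    let pre := (names.drop 1).foldl                -- for name in names[1:]: while-loop
      (fun p name => pyWhileDrop name p) (names.headD [])
    let idx := PySem.Chars.rfind pre ['_']         -- idx = prefix.rfind("_")
    if 0 ≤ idx then String.ofList (PySem.List.slice pre none (some (idx + 1))) else ""

-- ===== PORT B =====
-- zip(*names): take the column of heads while every name still has a character
def pyCols (ns : List (List Char)) : List (List Char) :=
  if ns.isEmpty || ns.any List.isEmpty then []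
  else ns.map (fun n => n.headD ' ') :: pyCols (ns.map (fun n => n.drop 1))
termination_by (ns.headD []).length
decreasing_by
  rename_i h
  simp only [Bool.or_eq_true, not_or] at h
  cases ns with
  | nil => simp at h
  | cons x rest =>
    simp only [List.any_cons, Bool.or_eq_true, not_or] at h
    cases x with
    | nil => simp at h
    | cons c cs => simp

-- for col in zip(*names): if any(ch != col[0] for ch in col): break; chars.append(col[0])
def pyCollect (cols : List (List Char)) : List Char :=
  match cols with
  | [] => []
  | col :: rest =>
    match col with
    | [] => []                                   -- zip never yields an empty tuple here
    | c :: _ => if col.any (fun ch => ch ≠ c) then [] else c :: pyCollect rest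

def enum_common_prefix_py_alt (values : List (String × Int)) : String :=
  match values with
  | [] => ""                                     -- if not values: return ""
  | _ :: _ =>
    let names := values.map (fun v => v.1.toList)  -- names = [v[0] for v in values]
    let pre := pyCollect (pyCols names)            -- prefix = "".join(chars)
    let idx := PySem.Chars.rfind pre ['_']         -- idx = prefix.rfind("_")
    if 0 ≤ idx then String.ofList (PySem.List.slice pre none (some (idx + 1))) else ""

-- ===== PRECONDITION & SPEC =====
def Spec_enum_common_prefix_py (values : List (String × Int)) (out : String) : Prop := out = enum_common_prefix_py_alt values
instance (values : List (String × Int)) (out : String) : Decidable (Spec_enum_common_prefix_py values out) := by unfold Spec_enum_common_prefix_py; infer_instance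

-- ===== CLAIM (what is proved, stated in full; the proofs are below) =====
def Claim_equal_enum_common_prefix_py : Prop := ∀ (values : List (String × Int)), Dom_enum_common_prefix_py values → Spec_enum_common_prefix_py values (enum_common_prefix_py values)

-- ===== LEMMAS AND PROOFS =====

-- unfold helpers for pyCols (its equation rewrites every occurrence, including the recursive one)
theorem pyCols_stop (ns : List (List Char)) (h : (ns.isEmpty || ns.any List.isEmpty) = true) :
    pyCols ns = [] := by rw [pyCols, if_pos h]

theorem pyCols_go (ns : List (List Char)) (h : (ns.isEmpty || ns.any List.isEmpty) = false) :
    pyCols ns = ns.map (fun n => n.headD ' ') :: pyCols (ns.map (fun n => n.drop 1)) := by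
  rw [pyCols]; simp [h]

-- longest prefix of p that is also a prefix of n (proof-side characterisation of both loops)
def lcp2 : List Char → List Char → List Char
  | [], _ => []
  | _ :: _, [] => []
  | a :: p, b :: n => if a = b then a :: lcp2 p n else []

theorem lcp2_of_prefix (p n : List Char) (h : p <+: n) : lcp2 p n = p := by
  induction p generalizing n with
  | nil => rfl
  | cons a q ih =>
    cases n with
    | nil => exact absurd (List.prefix_nil.mp h) (by simp)
    | cons b m =>
      obtain ⟨rfl, h2⟩ := List.cons_prefix_cons.mp h
      simp [lcp2, ih m h2]

theorem lcp2_dropLast (p n : List Char) (h : ¬ p <+: n) : lcp2 p n = lcp2 p.dropLast n := by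
  induction p generalizing n with
  | nil => exact absurd List.nil_prefix h
  | cons a q ih =>
    cases n with
    | nil =>
      cases q with
      | nil => rfl
      | cons b r => simp [lcp2]
    | cons b m =>
      by_cases hab : a = b
      · subst hab
        have hq : ¬ q <+: m := fun hc => h (List.cons_prefix_cons.mpr ⟨rfl, hc⟩)
        have hqn : q ≠ [] := by
          intro hq0; subst hq0; exact hq List.nil_prefix
        cases q with
        | nil => exact absurd rfl hqn
        | cons c r =>
          simp only [List.dropLast_cons₂, lcp2, if_true]
          rw [ih m hq]
      · cases q with
        | nil => simp [lcp2, hab]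
        | cons c r => simp [lcp2, hab]

theorem pyWhileDrop_eq_lcp2 (name p : List Char) : pyWhileDrop name p = lcp2 p name := by
  induction p using pyWhileDrop.induct name with
  | case1 p h =>
    rw [pyWhileDrop, if_pos h]
    exact (lcp2_of_prefix p name ((PySem.Chars.startswith_iff name p).mp h)).symm
  | case2 p h ih =>
    rw [pyWhileDrop, if_neg h]
    rw [ih, pvSliceNegOne]
    exact (lcp2_dropLast p name (fun hc => h ((PySem.Chars.startswith_iff name p).mpr hc))).symm

-- pyCollect ∘ pyCols on a singleton returns the name itself
theorem collect_cols_nil (h : List Char) : pyCollect (pyCols [h]) = h := by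
  induction h with
  | nil => rw [pyCols_stop [[]] (by simp)]; rfl
  | cons c cs ih =>
    rw [pyCols_go [c :: cs] (by simp)]
    simpa [pyCollect] using ih

-- a column whose first character is c continues iff no later character differs from c
theorem pyCollect_cons (c : Char) (rest : List Char) (X : List (List Char)) :
    pyCollect ((c :: rest) :: X) =
      if rest.any (fun ch => ch ≠ c) then [] else c :: pyCollect X := by
  simp [pyCollect]

-- pyCollect ∘ pyCols eats one name at a time via lcp2
theorem collect_cols_step (h n : List Char) (ns : List (List Char)) :
    pyCollect (pyCols (h :: n :: ns)) = pyCollect (pyCols (lcp2 h n :: ns)) := by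
  induction h generalizing n ns with
  | nil =>
    rw [pyCols_stop ([] :: n :: ns) (by simp), pyCols_stop (lcp2 [] n :: ns) (by simp [lcp2])]
  | cons c cs ih =>
    cases n with
    | nil =>
      rw [pyCols_stop ((c :: cs) :: [] :: ns) (by simp)]
      have hl : lcp2 (c :: cs) [] = [] := rfl
      rw [hl, pyCols_stop ([] :: ns) (by simp)]
    | cons d m =>
      by_cases hcd : c = d
      · subst hcd
        have hl : lcp2 (c :: cs) (c :: m) = c :: lcp2 cs m := by simp [lcp2]
        rw [hl]
        rcases Bool.eq_false_or_eq_true (ns.any List.isEmpty) with hbf | hbf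
        · rw [pyCols_stop _ (by simp [List.any_cons, hbf]),
              pyCols_stop _ (by simp [List.any_cons, hbf])]
        · rw [pyCols_go ((c :: cs) :: (c :: m) :: ns)
                (by simp only [List.isEmpty_cons, List.any_cons, hbf, Bool.or_false]),
              pyCols_go ((c :: lcp2 cs m) :: ns)
                (by simp only [List.isEmpty_cons, List.any_cons, hbf, Bool.or_false])]
          simp only [List.map_cons, List.headD_cons, List.drop_succ_cons, List.drop_zero]
          rw [pyCollect_cons c (c :: (ns.map (fun n => n.headD ' '))),
              pyCollect_cons c (ns.map (fun n => n.headD ' '))]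
          simp only [List.any_cons, ne_eq, not_true_eq_false, decide_false, Bool.false_or]
          by_cases hall : (ns.map (fun n => n.headD ' ')).any (fun ch => decide ¬ch = c)
          · rw [if_pos hall, if_pos hall]
          · rw [if_neg hall, if_neg hall, ih m (ns.map (fun n => n.drop 1))]
      · have hl : lcp2 (c :: cs) (d :: m) = [] := by simp [lcp2, hcd]
        rw [hl]
        rcases Bool.eq_false_or_eq_true (ns.any List.isEmpty) with hbf | hbf
        · rw [pyCols_stop _ (by simp [List.any_cons, hbf]), pyCols_stop ([] :: ns) (by simp)]
        · rw [pyCols_go ((c :: cs) :: (d :: m) :: ns)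
                (by simp only [List.isEmpty_cons, List.any_cons, hbf, Bool.or_false]),
              pyCols_stop ([] :: ns) (by simp)]
          simp only [List.map_cons, List.headD_cons]
          rw [pyCollect_cons c (d :: (ns.map (fun n => n.headD ' ')))]
          have hdc : d ≠ c := fun e => hcd e.symm
          simp [hdc, pyCollect]

theorem foldl_lcp2_eq_collect (t : List (List Char)) (h : List Char) :
    t.foldl lcp2 h = pyCollect (pyCols (h :: t)) := by
  induction t generalizing h with
  | nil => exact (collect_cols_nil h).symm
  | cons n ns ih =>
    rw [List.foldl_cons, ih (lcp2 h n), collect_cols_step]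

theorem foldl_whileDrop_eq_collect (t : List (List Char)) (h : List Char) :
    t.foldl (fun p name => pyWhileDrop name p) h = pyCollect (pyCols (h :: t)) := by
  rw [← foldl_lcp2_eq_collect]
  induction t generalizing h with
  | nil => rfl
  | cons n ns ih => rw [List.foldl_cons, List.foldl_cons, pyWhileDrop_eq_lcp2, ih]

-- ===== VERDICT (by name: the statement is the Claim_ definition above) =====
theorem enum_common_prefix_py_spec : Claim_equal_enum_common_prefix_py := by
  intro values _
  unfold Spec_enum_common_prefix_py enum_common_prefix_py enum_common_prefix_py_alt
  cases values with
  | nil => rfl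
  | cons v vs =>
    simp only [List.map_cons, List.drop_succ_cons, List.drop_zero, List.headD_cons]
    rw [foldl_whileDrop_eq_collect]
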